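-- pv_equiv track=rewrite | github.com/GringoBandito/Coding-Challenges | 143/word_processing.py | get_longest_words_startswith
-- ===== SOURCE A (Python) =====
-- def get_longest_word(words):
--     """Input: List of words
--     Output: Longest word in list"""
--     assert isinstance(words, list) and len(words) > 0
--     for i in words:
--         assert isinstance(i,str) and len(i) > 0 and i.isalpha()
--
--     top = 0
--     word = ''
--
--     for i in words:
--         if len(i) > top:
--             top = len(i)
--             word = i
--
--     return word
--
-- def get_longest_words_startswith(words,start):
--     """Inputs: words - list of string of words
--     start - str, letter of alphabet
--     Output: Words with longest length starting with letter 'start' """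
--     assert isinstance(words,list) and len(words) > 0
--     assert isinstance(start,str) and start.isalpha()
--     for i in words:
--         assert isinstance(i,str) and len(i) > 0 and i.isalpha()
--
--     lst = []
--
--     for i in words:
--         if i[0] == start:
--             lst.append(i)
--
--     return get_longest_word(lst)
-- ===== SOURCE B (Python) =====
-- def get_longest_words_startswith(words, start):
--     """Inputs: words - list of string of words
--     start - str, letter of alphabet
--     Output: Words with longest length starting with letter 'start' """
--     assert isinstance(words, list) and len(words) > 0
--     assert isinstance(start, str) and start.isalpha()
--     for i in words:
--         assert isinstance(i, str) and len(i) > 0 and i.isalpha()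
--
--     # Rank the matching words by length, longest first; Python's sort is
--     # stable, so ties keep their original order and ranked[0] is the first
--     # word of maximal length (IndexError if no word matches, where A's
--     # helper raises AssertionError).
--     ranked = sorted((w for w in words if w[:1] == start), key=len, reverse=True)
--     return ranked[0]
-- ===== Notes on version B (the rewrite author's own statement) =====
-- stated objective: alternative
-- what changed: Replaces A's filter-into-a-list pass plus a separate running-maximum helper by a stable reverse sort of the matching words by length and taking the first element (stability gives the same first-maximal tie-breaking).
import Mathlib
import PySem

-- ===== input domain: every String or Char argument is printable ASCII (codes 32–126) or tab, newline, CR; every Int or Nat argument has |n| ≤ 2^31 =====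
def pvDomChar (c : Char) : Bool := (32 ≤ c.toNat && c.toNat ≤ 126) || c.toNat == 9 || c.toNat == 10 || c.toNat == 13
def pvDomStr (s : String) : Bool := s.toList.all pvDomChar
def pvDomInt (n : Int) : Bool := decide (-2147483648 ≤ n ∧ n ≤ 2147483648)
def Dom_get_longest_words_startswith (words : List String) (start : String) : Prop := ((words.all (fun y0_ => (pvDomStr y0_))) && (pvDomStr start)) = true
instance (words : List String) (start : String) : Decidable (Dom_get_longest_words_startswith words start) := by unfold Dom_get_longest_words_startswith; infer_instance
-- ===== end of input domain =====

-- B replaces A's filter pass plus the running-maximum helper by a stable reverse sort of the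
-- matching words by length and taking the first element; same value wherever A returns.

-- ===== PORT A =====
-- Python's `i[0] == start`: i[0] is the one-character string at index 0
-- (IndexError = none, excluded by Pre_), compared with start.
def pvStartsWith (start : String) (i : String) : Bool :=
  (PySem.Str.pyGet? i 0).map (fun c => [c]) == some start.toList

-- helper get_longest_word: running maximum with strict `>` (first maximal wins), top=0, word=''
def get_longest_word (words : List String) : String :=
  (words.foldl (fun s i => if PySem.Str.len i > s.1 then (PySem.Str.len i, i) else s)
    ((0 : Int), "")).2

def get_longest_words_startswith (words : List String) (start : String) : String :=
  get_longest_word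
    (words.foldl (fun lst i => if pvStartsWith start i then lst ++ [i] else lst) [])

-- ===== PORT B =====
-- `w[:1] == start` is PySem.Str.slice w none (some 1); `ranked[0]` raises IndexError on an
-- empty list (outside Pre_), ported as head?.getD "".
def get_longest_words_startswith_alt (words : List String) (start : String) : String :=
  (PySem.List.sorted
      (words.filter (fun w => PySem.Str.slice w none (some 1) == start))
      (fun w => PySem.Str.len w) true).head?.getD ""

-- ===== PRECONDITION & SPEC =====
-- Pre_ = exactly the inputs where A returns: A's asserts demand a non-empty list of non-empty
-- alphabetic words and an alphabetic start, and the helper's assert demands that at least one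
-- word starts with start (A raises AssertionError otherwise; B raises IndexError there).
def Pre_get_longest_words_startswith (words : List String) (start : String) : Prop :=
  words ≠ [] ∧
  start.toList ≠ [] ∧ start.toList.all PySem.Str.isalpha = true ∧
  (∀ w ∈ words, w.toList ≠ [] ∧ w.toList.all PySem.Str.isalpha = true) ∧
  (∃ w ∈ words, w.toList.take 1 = start.toList)
instance (words : List String) (start : String) : Decidable (Pre_get_longest_words_startswith words start) := by unfold Pre_get_longest_words_startswith; infer_instance

def pvWitness_get_longest_words_startswith : List String × String := (["apple", "ant", "bee"], "a")

def Spec_get_longest_words_startswith (words : List String) (start : String) (out : String) : Prop := out = get_longest_words_startswith_alt words start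
instance (words : List String) (start : String) (out : String) : Decidable (Spec_get_longest_words_startswith words start out) := by unfold Spec_get_longest_words_startswith; infer_instance

-- ===== CLAIM (what is proved, stated in full; the proofs are below) =====
def Claim_equal_get_longest_words_startswith : Prop := ∀ (words : List String) (start : String), Dom_get_longest_words_startswith words start → Pre_get_longest_words_startswith words start → Spec_get_longest_words_startswith words start (get_longest_words_startswith words start)

-- ===== LEMMAS AND PROOFS =====

-- A's append-if loop builds exactly the filtered list (cited library loop shape).
theorem pv_lst_eq_filter (words : List String) (start : String) :
    words.foldl (fun lst i => if pvStartsWith start i then lst ++ [i] else lst) []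
      = words.filter (pvStartsWith start) := by
  have h := PySem.List.foldl_append_if (pvStartsWith start) (fun x => x) words []
  simpa using h

-- On non-empty words, A's `i[0] == start` test and B's `w[:1] == start` test agree.
theorem pv_filter_eq (words : List String) (start : String)
    (h : ∀ w ∈ words, w.toList ≠ []) :
    words.filter (pvStartsWith start)
      = words.filter (fun w => PySem.Str.slice w none (some 1) == start) := by
  apply List.filter_congr
  intro w hw
  obtain ⟨c, t, hct⟩ := List.exists_cons_of_ne_nil (h w hw)
  have hslice : (PySem.Str.slice w none (some 1)).toList = [c] := by
    simp [PySem.Str.toList_slice, hct, PySem.List.slice_to]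
  rw [Bool.eq_iff_iff]
  simp [pvStartsWith, PySem.Str.pyGet?, PySem.Chars.pyGet?, hct, ← String.toList_inj, hslice]

-- head of insertBy into a non-empty list
theorem pv_head_insertBy {α : Type} (bf : α → α → Bool) (x y : α) (ys : List α) :
    PySem.List.insertBy bf x (y :: ys) = if bf x y then x :: y :: ys
      else y :: PySem.List.insertBy bf x ys := by
  simp [PySem.List.insertBy]

-- The head of the insertBy fold (= the stable reverse sort) is the running
-- first-maximum of the inserted elements.
theorem pv_fold_insertBy_head {α : Type} (bf : α → α → Bool) :
    ∀ (l : List α) (y : α) (ys : List α),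
    (l.foldl (fun acc x => PySem.List.insertBy bf x acc) (y :: ys)).head?
      = some (l.foldl (fun m x => if bf x m then x else m) y) := by
  intro l
  induction l with
  | nil => intro y ys; simp
  | cons x t ih =>
      intro y ys
      by_cases h : bf x y
      · simpa [pv_head_insertBy, h] using ih x (y :: ys)
      · simpa [pv_head_insertBy, h] using ih y (PySem.List.insertBy bf x ys)

-- head of sorted-reverse = the running strict maximum (first maximal wins)
theorem pv_sorted_head (i₀ : String) (rest : List String) :
    ((PySem.List.sorted (i₀ :: rest) (fun w => PySem.Str.len w) true).head?
      = some (rest.foldl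
          (fun m x => if PySem.Str.len m < PySem.Str.len x then x else m) i₀)) := by
  rw [PySem.List.sorted_rev_eq_foldl_insertBy]
  have h := pv_fold_insertBy_head
    (fun a b => decide (PySem.Str.len b < PySem.Str.len a)) rest i₀ []
  simpa [PySem.List.insertBy] using h

-- A's pair-valued running-maximum fold carries (len m, m) for the same running maximum m.
theorem pv_pair_fold (rest : List String) : ∀ (w : String),
    rest.foldl (fun s i => if PySem.Str.len i > s.1 then (PySem.Str.len i, i) else s)
      (PySem.Str.len w, w)
      = (PySem.Str.len (rest.foldl
            (fun m x => if PySem.Str.len m < PySem.Str.len x then x else m) w),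
         rest.foldl (fun m x => if PySem.Str.len m < PySem.Str.len x then x else m) w) := by
  induction rest with
  | nil => intro w; simp
  | cons i t ih =>
      intro w
      simp only [List.foldl_cons, gt_iff_lt]
      by_cases h : PySem.Str.len w < PySem.Str.len i
      · rw [if_pos h, if_pos h]; exact ih i
      · rw [if_neg h, if_neg h]; exact ih w

-- ===== VERDICT (by name: the statement is the Claim_ definition above) =====
theorem get_longest_words_startswith_spec : Claim_equal_get_longest_words_startswith := by
  intro words start _hdom hpre
  obtain ⟨-, hst, -, hwords, w, hwmem, hwtake⟩ := hpre
  show get_longest_words_startswith words start = get_longest_words_startswith_alt words start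
  unfold get_longest_words_startswith get_longest_words_startswith_alt get_longest_word
  rw [pv_lst_eq_filter, ← pv_filter_eq words start (fun w hw => (hwords w hw).1)]
  have hmem : w ∈ words.filter (pvStartsWith start) := by
    refine List.mem_filter.mpr ⟨hwmem, ?_⟩
    obtain ⟨c, t, hct⟩ := List.exists_cons_of_ne_nil (hwords w hwmem).1
    simp [pvStartsWith, PySem.Str.pyGet?, PySem.Chars.pyGet?, hct] at hwtake ⊢
    exact hwtake
  obtain ⟨i₀, rest, hcons⟩ := List.exists_cons_of_ne_nil (List.ne_nil_of_mem hmem)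
  rw [hcons]
  have hi₀ : i₀ ∈ words := (List.mem_filter.mp (hcons ▸ List.mem_cons_self)).1
  have hpos : PySem.Str.len i₀ > 0 := by
    rw [PySem.Str.len_eq]
    exact_mod_cast List.length_pos_of_ne_nil (hwords i₀ hi₀).1
  simp only [List.foldl_cons, if_pos hpos]
  rw [pv_pair_fold, pv_sorted_head]
  simp
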